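-- pv_equiv track=rewrite | github.com/njrun1804/wheel-trading | meta_active_improvement_engine.py | _improve_naming
-- ===== SOURCE A (Python) =====
-- def _improve_naming(code: str) -> str:
--     """Improve variable naming based on Claude patterns"""
--
--     # Simple example: replace single letters with descriptive names
--     naming_map = {
--         'x =': 'value =',
--         'y =': 'result =',
--         'z =': 'output =',
--         'd =': 'data =',
--         'f =': 'file_obj =',
--         's =': 'text ='
--     }
--
--     improved_code = code
--     for old, new in naming_map.items():
--         improved_code = improved_code.replace(old, new)
--
--     return improved_code
-- ===== SOURCE B (Python) =====
-- def _improve_naming(code: str) -> str: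
--     """Improve variable naming based on Claude patterns"""
--     names = {'x': 'value', 'y': 'result', 'z': 'output',
--              'd': 'data', 'f': 'file_obj', 's': 'text'}
--     out = []
--     i = 0
--     n = len(code)
--     while i < n:
--         c = code[i]
--         if c in names and code[i + 1:i + 3] == ' =':
--             out.append(names[c] + ' =')
--             i += 3
--         else:
--             out.append(c)
--             i += 1
--     return ''.join(out)
-- ===== Notes on version B (the rewrite author's own statement) =====
-- stated objective: alternative
-- what changed: Replaces A's six sequential full-string str.replace passes by a single left-to-right scan that checks each position against a dict of single-letter names and emits either the renamed token or the character, building the output once.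
import Mathlib
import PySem

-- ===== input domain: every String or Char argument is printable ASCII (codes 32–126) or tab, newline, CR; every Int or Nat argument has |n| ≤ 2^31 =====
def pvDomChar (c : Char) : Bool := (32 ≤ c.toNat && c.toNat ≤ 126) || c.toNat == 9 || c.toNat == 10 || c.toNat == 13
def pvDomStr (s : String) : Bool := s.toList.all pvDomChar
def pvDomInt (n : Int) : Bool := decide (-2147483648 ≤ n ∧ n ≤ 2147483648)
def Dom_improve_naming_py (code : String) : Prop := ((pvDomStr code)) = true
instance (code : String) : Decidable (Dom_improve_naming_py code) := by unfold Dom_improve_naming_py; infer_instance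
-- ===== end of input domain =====

-- B replaces A's six sequential full-string .replace passes by a single left-to-right scan with a
-- lookup table (objective: alternative — one pass instead of six; not faster in CPython, whose
-- str.replace runs in C).

-- ===== PORT A =====
-- the dict literal of A, in insertion order
def pvNamingMap : List (String × String) :=
  [("x =", "value ="), ("y =", "result ="), ("z =", "output ="),
   ("d =", "data ="), ("f =", "file_obj ="), ("s =", "text =")]

def improve_naming_py (code : String) : String :=
  pvNamingMap.foldl (fun improved p => PySem.Str.replace improved p.1 p.2) code

-- ===== PORT B =====
-- B's lookup table: single-letter name → replacement word
def pvNames : List (Char × String) :=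
  [('x', "value"), ('y', "result"), ('z', "output"),
   ('d', "data"), ('f', "file_obj"), ('s', "text")]

-- B's while loop: emit either the renamed token (consuming 3 chars) or one char
def pvScan : List Char → List Char
  | [] => []
  | c :: t =>
    match pvNames.lookup c with
    | some w => if t.take 2 = [' ', '='] then w.toList ++ ' ' :: '=' :: pvScan (t.drop 2)
                else c :: pvScan t
    | none => c :: pvScan t
termination_by l => l.length
decreasing_by
  all_goals simp only [List.length_cons, List.length_drop]
  all_goals omega

def improve_naming_py_alt (code : String) : String := String.ofList (pvScan code.toList)

-- ===== PRECONDITION & SPEC =====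
def Spec_improve_naming_py (code : String) (out : String) : Prop := out = improve_naming_py_alt code
instance (code : String) (out : String) : Decidable (Spec_improve_naming_py code out) := by unfold Spec_improve_naming_py; infer_instance

-- ===== CLAIM (what is proved, stated in full; the proofs are below) =====
def Claim_equal_improve_naming_py : Prop := ∀ (code : String), Dom_improve_naming_py code → Spec_improve_naming_py code (improve_naming_py code)

-- ===== LEMMAS AND PROOFS =====

-- A's str.replace (nonempty pattern), as a plain recursion on the list
def pvRep (old new : List Char) : List Char → List Char
  | [] => []
  | c :: t =>
    if old.isPrefixOf (c :: t) then new ++ pvRep old new (t.drop (old.length - 1))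
    else c :: pvRep old new t
termination_by l => l.length
decreasing_by
  · simp only [List.length_cons, List.length_drop]; omega
  · simp

lemma pvGo_eq (old new : List Char) (h : old ≠ []) :
    ∀ (fuel : Nat) (l acc : List Char), l.length ≤ fuel →
      PySem.Chars.replace.go old new fuel l acc = acc.reverse ++ pvRep old new l := by
  intro fuel
  induction fuel with
  | zero =>
    intro l acc hl
    have : l = [] := by cases l <;> simp_all
    subst this
    simp [PySem.Chars.replace.go, pvRep]
  | succ n ih =>
    intro l acc hl
    cases l with
    | nil => simp [PySem.Chars.replace.go, pvRep]
    | cons c t =>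
      have hol : 0 < old.length := List.length_pos_of_ne_nil h
      have hlt : t.length + 1 ≤ n + 1 := by simpa using hl
      rw [PySem.Chars.replace.go]
      by_cases hp : old.isPrefixOf (c :: t) = true
      · have h1 : (List.drop old.length (c :: t)).length ≤ n := by
          simp only [List.length_drop, List.length_cons]; omega
        rw [if_pos hp, ih _ _ h1, pvRep, if_pos hp]
        have hd : List.drop old.length (c :: t) = t.drop (old.length - 1) := by
          cases old with
          | nil => exact absurd rfl h
          | cons o os => simp
        rw [hd]
        simp
      · have h1 : t.length ≤ n := by omega
        rw [if_neg hp, ih _ _ h1, pvRep, if_neg hp]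
        simp

lemma pvReplace_eq (s old new : List Char) (h : old ≠ []) :
    PySem.Chars.replace s old new = pvRep old new s := by
  have he : old.isEmpty = false := by cases old <;> simp_all
  simp only [PySem.Chars.replace, he, Bool.false_eq_true, if_false]
  exact pvGo_eq old new h s.length s [] le_rfl

def pvPat (k : Char) : List Char := [k, ' ', '=']

lemma pvRep_skip {c k : Char} (w : List Char) (h : c ≠ k) (t : List Char) :
    pvRep (pvPat k) w (c :: t) = c :: pvRep (pvPat k) w t := by
  rw [pvRep]
  have : (pvPat k).isPrefixOf (c :: t) = false := by
    simp [pvPat, List.isPrefixOf, (Ne.symm h)]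
  simp [this]

lemma pvRep_match (k : Char) (w t : List Char) :
    pvRep (pvPat k) w (k :: ' ' :: '=' :: t) = w ++ pvRep (pvPat k) w t := by
  rw [pvRep]
  simp [pvPat, List.isPrefixOf]

lemma pvRep_skip2 {t : List Char} (k c : Char) (w : List Char) (h : ¬ [' ', '='] <+: t) :
    pvRep (pvPat k) w (c :: t) = c :: pvRep (pvPat k) w t := by
  rw [pvRep]
  have h2 : List.isPrefixOf [' ', '='] t = false := by
    rw [← Bool.not_eq_true, List.isPrefixOf_iff_prefix]; exact h
  have : (pvPat k).isPrefixOf (c :: t) = false := by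
    simp [pvPat, List.isPrefixOf, h2]
  simp [this]

lemma pvRep_head (k : Char) (w t : List Char) (hw : w ≠ []) (hw0 : w.head? ≠ some '=')
    (ht : t.head? ≠ some '=') : (pvRep (pvPat k) w t).head? ≠ some '=' := by
  cases t with
  | nil => simp [pvRep]
  | cons c t' =>
    rw [pvRep]
    split
    · cases w with
      | nil => exact absurd rfl hw
      | cons a w' => simpa using hw0
    · simpa using ht

lemma pvRep_nsp (k : Char) (w t : List Char) (hw : w ≠ []) (hws : w.head? ≠ some ' ')
    (hwe : w.head? ≠ some '=') (h : ¬ [' ', '='] <+: t) :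
    ¬ [' ', '='] <+: pvRep (pvPat k) w t := by
  cases t with
  | nil => simp [pvRep]
  | cons a t' =>
    rw [pvRep]
    split
    · intro hp
      obtain ⟨r, hr⟩ := hp
      cases w with
      | nil => exact absurd rfl hw
      | cons b w' =>
        have hr' : ' ' :: '=' :: r = b :: (w' ++ pvRep (pvPat k) (b :: w') (t'.drop ((pvPat k).length - 1))) := hr
        injection hr' with hb _
        exact hws (by simp [← hb])
    · intro hp
      obtain ⟨r, hr⟩ := hp
      have hr' : ' ' :: '=' :: r = a :: pvRep (pvPat k) w t' := hr
      injection hr' with ha htl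
      have ht' : t'.head? ≠ some '=' := by
        intro hh
        cases t' with
        | nil => simp at hh
        | cons u t'' =>
          simp at hh
          subst hh
          exact h ⟨t'', by rw [← ha]; rfl⟩
      exact (pvRep_head k w t' hw hwe ht') (by rw [← htl]; rfl)

def pvInert (k : Char) : List Char → Bool
  | [] => true
  | [a] => !(a == k)
  | [a, b] => (!(a == k && b == ' ')) && !(b == k)
  | a :: b :: c :: rest => (!(a == k && b == ' ' && c == '=')) && pvInert k (b :: c :: rest)

lemma pvInert_pass (k : Char) (w : List Char) :
    ∀ p, pvInert k p = true → ∀ t, pvRep (pvPat k) w (p ++ t) = p ++ pvRep (pvPat k) w t := by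
  intro p
  induction p using pvInert.induct with
  | case1 => intro _ t; simp
  | case2 a =>
    intro h t
    have ha : a ≠ k := by
      intro hak; subst hak; simp [pvInert] at h
    simpa using pvRep_skip w ha t
  | case3 a b =>
    intro h t
    have hbk : b ≠ k := by
      intro hb; subst hb; simp [pvInert] at h
    have step : pvRep (pvPat k) w (a :: b :: t) = a :: pvRep (pvPat k) w (b :: t) := by
      by_cases hak : a = k
      · have hb : b ≠ ' ' := by
          intro hb; subst hak hb; simp [pvInert] at h
        have hnp : ¬ [' ', '='] <+: (b :: t) := by
          intro hp; obtain ⟨r, hr⟩ := hp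
          have hr' : ' ' :: '=' :: r = b :: t := hr
          injection hr' with h1 _
          exact hb h1.symm
        exact pvRep_skip2 k a w hnp
      · exact pvRep_skip w hak _
    show pvRep (pvPat k) w (a :: b :: t) = a :: b :: pvRep (pvPat k) w t
    rw [step, pvRep_skip w hbk]
  | case4 a b c rest ih =>
    intro h t
    have h2 : pvInert k (b :: c :: rest) = true := by
      simp only [pvInert, Bool.and_eq_true] at h; exact h.2
    have h1 : ¬ (a = k ∧ b = ' ' ∧ c = '=') := by
      rintro ⟨rfl, rfl, rfl⟩
      simp [pvInert] at h
    have step : pvRep (pvPat k) w (a :: b :: c :: (rest ++ t)) =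
        a :: pvRep (pvPat k) w (b :: c :: (rest ++ t)) := by
      by_cases hak : a = k
      · have hnp : ¬ [' ', '='] <+: (b :: c :: (rest ++ t)) := by
          intro hp; obtain ⟨r, hr⟩ := hp
          have hr' : ' ' :: '=' :: r = b :: c :: (rest ++ t) := hr
          injection hr' with hb hr''
          injection hr'' with hc _
          exact h1 ⟨hak, hb.symm, hc.symm⟩
        exact pvRep_skip2 k a w hnp
      · exact pvRep_skip w hak _
    have goal0 := ih h2 t
    show pvRep (pvPat k) w (a :: b :: c :: (rest ++ t)) = a :: b :: c :: (rest ++ pvRep (pvPat k) w t)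
    rw [step]
    simp only [List.cons_append] at goal0
    rw [goal0]

-- the full replacement string for a key, and A's chain of six replaces
def pvWfull (k : Char) : List Char := ((pvNames.lookup k).getD "").toList ++ [' ', '=']
def pvChain (l : List Char) : List Char :=
  pvRep (pvPat 's') (pvWfull 's') (pvRep (pvPat 'f') (pvWfull 'f') (pvRep (pvPat 'd') (pvWfull 'd')
    (pvRep (pvPat 'z') (pvWfull 'z') (pvRep (pvPat 'y') (pvWfull 'y') (pvRep (pvPat 'x') (pvWfull 'x') l)))))

lemma pvRep_pass3 {c k' : Char} (w t : List Char) (h1 : c ≠ k') (h2 : (' ' : Char) ≠ k')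
    (h3 : ('=' : Char) ≠ k') :
    pvRep (pvPat k') w (c :: ' ' :: '=' :: t) = c :: ' ' :: '=' :: pvRep (pvPat k') w t := by
  rw [pvRep_skip w h1, pvRep_skip w h2, pvRep_skip w h3]

lemma portA_eq_chain (code : String) : (improve_naming_py code).toList = pvChain code.toList := by
  simp only [improve_naming_py, pvNamingMap, List.foldl_cons, List.foldl_nil]
  simp only [PySem.Str.toList_replace]
  rw [pvReplace_eq _ _ _ (by decide), pvReplace_eq _ _ _ (by decide),
      pvReplace_eq _ _ _ (by decide), pvReplace_eq _ _ _ (by decide),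
      pvReplace_eq _ _ _ (by decide), pvReplace_eq _ _ _ (by decide)]
  have ex : "x =".toList = pvPat 'x' := by decide
  have ey : "y =".toList = pvPat 'y' := by decide
  have ez : "z =".toList = pvPat 'z' := by decide
  have ed : "d =".toList = pvPat 'd' := by decide
  have ef : "f =".toList = pvPat 'f' := by decide
  have es : "s =".toList = pvPat 's' := by decide
  have wx : "value =".toList = pvWfull 'x' := by decide
  have wy : "result =".toList = pvWfull 'y' := by decide
  have wz : "output =".toList = pvWfull 'z' := by decide
  have wd : "data =".toList = pvWfull 'd' := by decide
  have wf : "file_obj =".toList = pvWfull 'f' := by decide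
  have ws : "text =".toList = pvWfull 's' := by decide
  rw [ex, ey, ez, ed, ef, es, wx, wy, wz, wd, wf, ws]
  rfl

lemma pvScan_none {c : Char} (h : pvNames.lookup c = none) (t : List Char) :
    pvScan (c :: t) = c :: pvScan t := by
  rw [pvScan.eq_def]; simp [h]

lemma pvScan_key {k : Char} {w : String} (h : pvNames.lookup k = some w) (r : List Char) :
    pvScan (k :: ' ' :: '=' :: r) = w.toList ++ ' ' :: '=' :: pvScan r := by
  rw [pvScan.eq_def]; simp [h]

lemma pvScan_no2 (c : Char) {t : List Char} (h : t.take 2 ≠ [' ', '=']) :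
    pvScan (c :: t) = c :: pvScan t := by
  rw [pvScan.eq_def]
  cases h' : pvNames.lookup c <;> simp [h', h]

lemma chain_eq_scan : ∀ (n : Nat) (l : List Char), l.length ≤ n → pvChain l = pvScan l := by
  intro n
  induction n with
  | zero =>
    intro l hl
    have : l = [] := by cases l <;> simp_all
    subst this
    simp only [pvChain]
    rw [pvScan.eq_def]
    simp [pvRep]
  | succ n ih =>
    intro l hl
    cases l with
    | nil =>
      simp only [pvChain]
      rw [pvScan.eq_def]
      simp [pvRep]
    | cons c t =>
      by_cases hsp : [' ', '='] <+: t
      · obtain ⟨r, hr⟩ := hsp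
        have hteq : t = ' ' :: '=' :: r := hr.symm
        subst hteq
        have hrn : r.length ≤ n := by simp at hl; omega
        have hscan := ih r hrn
        have fold : pvRep (pvPat 's') (pvWfull 's') (pvRep (pvPat 'f') (pvWfull 'f') (pvRep (pvPat 'd') (pvWfull 'd')
            (pvRep (pvPat 'z') (pvWfull 'z') (pvRep (pvPat 'y') (pvWfull 'y') (pvRep (pvPat 'x') (pvWfull 'x') r))))) = pvScan r := by
          rw [show pvRep (pvPat 's') (pvWfull 's') (pvRep (pvPat 'f') (pvWfull 'f') (pvRep (pvPat 'd') (pvWfull 'd')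
            (pvRep (pvPat 'z') (pvWfull 'z') (pvRep (pvPat 'y') (pvWfull 'y') (pvRep (pvPat 'x') (pvWfull 'x') r))))) = pvChain r from rfl]
          exact hscan
        by_cases hx : c = 'x'
        · subst hx
          simp only [pvChain]
          rw [pvRep_match, pvInert_pass 'y' _ _ (by decide), pvInert_pass 'z' _ _ (by decide),
              pvInert_pass 'd' _ _ (by decide), pvInert_pass 'f' _ _ (by decide),
              pvInert_pass 's' _ _ (by decide), fold, pvScan_key (w := "value") (by decide) r]
          rw [show pvWfull 'x' = "value".toList ++ [' ', '='] from by decide]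
          simp
        · by_cases hy : c = 'y'
          · subst hy
            simp only [pvChain]
            rw [pvRep_pass3 _ _ (by decide) (by decide) (by decide), pvRep_match,
                pvInert_pass 'z' _ _ (by decide), pvInert_pass 'd' _ _ (by decide),
                pvInert_pass 'f' _ _ (by decide), pvInert_pass 's' _ _ (by decide),
                fold, pvScan_key (w := "result") (by decide) r]
            rw [show pvWfull 'y' = "result".toList ++ [' ', '='] from by decide]
            simp
          · by_cases hz : c = 'z'
            · subst hz
              simp only [pvChain]
              rw [pvRep_pass3 _ _ (by decide) (by decide) (by decide),
                  pvRep_pass3 _ _ (by decide) (by decide) (by decide), pvRep_match,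
                  pvInert_pass 'd' _ _ (by decide), pvInert_pass 'f' _ _ (by decide),
                  pvInert_pass 's' _ _ (by decide), fold, pvScan_key (w := "output") (by decide) r]
              rw [show pvWfull 'z' = "output".toList ++ [' ', '='] from by decide]
              simp
            · by_cases hd : c = 'd'
              · subst hd
                simp only [pvChain]
                rw [pvRep_pass3 _ _ (by decide) (by decide) (by decide),
                    pvRep_pass3 _ _ (by decide) (by decide) (by decide),
                    pvRep_pass3 _ _ (by decide) (by decide) (by decide), pvRep_match,
                    pvInert_pass 'f' _ _ (by decide), pvInert_pass 's' _ _ (by decide),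
                    fold, pvScan_key (w := "data") (by decide) r]
                rw [show pvWfull 'd' = "data".toList ++ [' ', '='] from by decide]
                simp
              · by_cases hf : c = 'f'
                · subst hf
                  simp only [pvChain]
                  rw [pvRep_pass3 _ _ (by decide) (by decide) (by decide),
                      pvRep_pass3 _ _ (by decide) (by decide) (by decide),
                      pvRep_pass3 _ _ (by decide) (by decide) (by decide),
                      pvRep_pass3 _ _ (by decide) (by decide) (by decide), pvRep_match,
                      pvInert_pass 's' _ _ (by decide), fold, pvScan_key (w := "file_obj") (by decide) r]
                  rw [show pvWfull 'f' = "file_obj".toList ++ [' ', '='] from by decide]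
                  simp
                · by_cases hs : c = 's'
                  · subst hs
                    simp only [pvChain]
                    rw [pvRep_pass3 _ _ (by decide) (by decide) (by decide),
                        pvRep_pass3 _ _ (by decide) (by decide) (by decide),
                        pvRep_pass3 _ _ (by decide) (by decide) (by decide),
                        pvRep_pass3 _ _ (by decide) (by decide) (by decide),
                        pvRep_pass3 _ _ (by decide) (by decide) (by decide), pvRep_match,
                        fold, pvScan_key (w := "text") (by decide) r]
                    rw [show pvWfull 's' = "text".toList ++ [' ', '='] from by decide]
                    simp
                  · -- c is not a renamed letter: every pass and the scan just copy "c ="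
                    have hlc : pvNames.lookup c = none := by
                      have b1 : (c == 'x') = false := beq_eq_false_iff_ne.mpr hx
                      have b2 : (c == 'y') = false := beq_eq_false_iff_ne.mpr hy
                      have b3 : (c == 'z') = false := beq_eq_false_iff_ne.mpr hz
                      have b4 : (c == 'd') = false := beq_eq_false_iff_ne.mpr hd
                      have b5 : (c == 'f') = false := beq_eq_false_iff_ne.mpr hf
                      have b6 : (c == 's') = false := beq_eq_false_iff_ne.mpr hs
                      simp [pvNames, List.lookup, b1, b2, b3, b4, b5, b6]
                    simp only [pvChain]
                    rw [pvRep_pass3 _ _ hx (by decide) (by decide),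
                        pvRep_pass3 _ _ hy (by decide) (by decide),
                        pvRep_pass3 _ _ hz (by decide) (by decide),
                        pvRep_pass3 _ _ hd (by decide) (by decide),
                        pvRep_pass3 _ _ hf (by decide) (by decide),
                        pvRep_pass3 _ _ hs (by decide) (by decide),
                        fold, pvScan_none hlc, pvScan_none (by decide), pvScan_none (by decide)]
      · -- t does NOT start with " =": nothing is replaced at this position
        have htn : t.length ≤ n := by simp at hl; omega
        have hscan := ih t htn
        have htk : t.take 2 ≠ [' ', '='] := by
          intro he
          exact hsp ⟨t.drop 2, by rw [← he]; simp⟩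
        have n0 : ¬ [' ', '='] <+: t := hsp
        have n1 := pvRep_nsp 'x' (pvWfull 'x') t (by decide) (by decide) (by decide) n0
        have n2 := pvRep_nsp 'y' (pvWfull 'y') _ (by decide) (by decide) (by decide) n1
        have n3 := pvRep_nsp 'z' (pvWfull 'z') _ (by decide) (by decide) (by decide) n2
        have n4 := pvRep_nsp 'd' (pvWfull 'd') _ (by decide) (by decide) (by decide) n3
        have n5 := pvRep_nsp 'f' (pvWfull 'f') _ (by decide) (by decide) (by decide) n4
        have fold : pvRep (pvPat 's') (pvWfull 's') (pvRep (pvPat 'f') (pvWfull 'f') (pvRep (pvPat 'd') (pvWfull 'd')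
            (pvRep (pvPat 'z') (pvWfull 'z') (pvRep (pvPat 'y') (pvWfull 'y') (pvRep (pvPat 'x') (pvWfull 'x') t))))) = pvScan t := by
          rw [show pvRep (pvPat 's') (pvWfull 's') (pvRep (pvPat 'f') (pvWfull 'f') (pvRep (pvPat 'd') (pvWfull 'd')
            (pvRep (pvPat 'z') (pvWfull 'z') (pvRep (pvPat 'y') (pvWfull 'y') (pvRep (pvPat 'x') (pvWfull 'x') t))))) = pvChain t from rfl]
          exact hscan
        simp only [pvChain]
        rw [pvRep_skip2 'x' c _ n0, pvRep_skip2 'y' c _ n1, pvRep_skip2 'z' c _ n2,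
            pvRep_skip2 'd' c _ n3, pvRep_skip2 'f' c _ n4, pvRep_skip2 's' c _ n5,
            fold, pvScan_no2 c htk]

-- ===== VERDICT (by name: the statement is the Claim_ definition above) =====
theorem improve_naming_py_spec : Claim_equal_improve_naming_py := by
  intro code _
  show improve_naming_py code = improve_naming_py_alt code
  have h1 := portA_eq_chain code
  have h2 := chain_eq_scan code.toList.length code.toList le_rfl
  rw [improve_naming_py_alt, ← h2, ← h1, String.ofList_toList]
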